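-- pv_equiv track=rewrite | github.com/Cohnan/MUA201910 | Week5/e.py | binPositions
-- ===== SOURCE A (Python) =====
-- def binPositions(p, n): #Camino para llegar a la posicion de x
--     #p = array.index(x)
--     res = []
--
--     l = 0
--     h = n - 1
--     while (l <= h):
--         m = (l + h)//2
--         res.append(m)
--         if m == p:
--             break
--         elif m < p:
--             l = m + 1
--         else:
--             h = m - 1
--     return res
-- ===== SOURCE B (Python) =====
-- def binPositions(p, n):
--     # Recursive binary search over an (offset, size) view of the interval:
--     # the midpoint of a window of `size` elements starting at `l` is l + (size-1)//2.
--     def go(l, size):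
--         if size <= 0:
--             return []
--         k = (size - 1) // 2
--         m = l + k
--         if m == p:
--             return [m]
--         if m < p:
--             return [m] + go(m + 1, size - k - 1)
--         return [m] + go(l, k)
--     return go(0, n)
-- ===== Notes on version B (the rewrite author's own statement) =====
-- stated objective: alternative
-- what changed: Replaced A's iterative while loop over mutable (l, h) bounds with an appended result list by a divide-and-conquer recursion over an (offset, size) view of the interval, computing the midpoint as l + (size-1)//2 and consing probes front-to-back.
import Mathlib
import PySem

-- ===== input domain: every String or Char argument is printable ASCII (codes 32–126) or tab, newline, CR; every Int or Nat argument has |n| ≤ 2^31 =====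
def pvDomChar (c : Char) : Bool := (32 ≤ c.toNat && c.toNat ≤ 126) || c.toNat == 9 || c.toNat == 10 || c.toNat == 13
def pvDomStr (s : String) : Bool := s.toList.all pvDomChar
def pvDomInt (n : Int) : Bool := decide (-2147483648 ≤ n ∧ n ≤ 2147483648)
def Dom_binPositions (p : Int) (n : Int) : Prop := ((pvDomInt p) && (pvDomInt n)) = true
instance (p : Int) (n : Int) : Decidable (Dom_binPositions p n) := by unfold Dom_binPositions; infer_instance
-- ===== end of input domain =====

-- B replaces A's iterative while loop over mutable (l, h) bounds (appending to res) by a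
-- divide-and-conquer recursion over an (offset, size) view of the interval (objective: alternative).

-- ===== PORT A =====
-- A's while loop: state (l, h, res); terminates because the interval shrinks.
def binPositionsLoop (p : Int) (l h : Int) (res : List Int) : List Int :=
  if hlh : l ≤ h then
    let m := PySem.Int.floordiv (l + h) 2
    let res' := res ++ [m]
    if m = p then res'
    else if m < p then binPositionsLoop p (m + 1) h res'
    else binPositionsLoop p l (m - 1) res'
  else res
termination_by (h - l + 1).toNat
decreasing_by
  · have hb := PySem.Int.floordiv_two_mid_bounds hlh
    omega
  · have hb := PySem.Int.floordiv_two_mid_bounds hlh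
    omega

def binPositions (p : Int) (n : Int) : List Int :=
  binPositionsLoop p 0 (n - 1) []

-- ===== PORT B =====
-- recursion over (offset l, window size); midpoint of the window is l + (size-1)//2
def binPositionsGo (p : Int) (l size : Int) : List Int :=
  if hs : size ≤ 0 then []
  else
    let k := PySem.Int.floordiv (size - 1) 2
    let m := l + k
    if m = p then [m]
    else if m < p then m :: binPositionsGo p (m + 1) (size - k - 1)
    else m :: binPositionsGo p l k
termination_by size.toNat
decreasing_by
  · have hb := PySem.Int.floordiv_two_mid_bounds (by omega : (0:Int) ≤ size - 1)
    simp only [zero_add] at hb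
    omega
  · have hb := PySem.Int.floordiv_two_mid_bounds (by omega : (0:Int) ≤ size - 1)
    simp only [zero_add] at hb
    omega

def binPositions_alt (p : Int) (n : Int) : List Int :=
  binPositionsGo p 0 n

-- ===== PRECONDITION & SPEC =====
def Spec_binPositions (p : Int) (n : Int) (out : List Int) : Prop := out = binPositions_alt p n
instance (p : Int) (n : Int) (out : List Int) : Decidable (Spec_binPositions p n out) := by unfold Spec_binPositions; infer_instance

-- ===== CLAIM (what is proved, stated in full; the proofs are below) =====
def Claim_equal_binPositions : Prop := ∀ (p : Int) (n : Int), Dom_binPositions p n → Spec_binPositions p n (binPositions p n)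

-- ===== LEMMAS AND PROOFS =====
-- A's midpoint (l+h)//2 equals B's l + (h-l)//2 when l ≤ h
theorem mid_shift (l h : Int) (_hlh : l ≤ h) :
    PySem.Int.floordiv (l + h) 2 = l + PySem.Int.floordiv (h - l) 2 := by
  have hk : PySem.Int.floordiv (h - l) 2 = PySem.Int.floordiv (h - l) 2 := rfl
  rw [PySem.Int.floordiv_eq_iff_of_pos (by norm_num : (0:Int) < 2)] at hk ⊢
  omega

theorem binPositionsLoop_eq_go (p : Int) :
    ∀ (fuel : Nat) (l h : Int), (h - l + 1).toNat ≤ fuel →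
      ∀ res, binPositionsLoop p l h res = res ++ binPositionsGo p l (h - l + 1) := by
  intro fuel
  induction fuel with
  | zero =>
    intro l h hk res
    have hlh : ¬ l ≤ h := by omega
    rw [binPositionsLoop, binPositionsGo]
    simp [hlh, (show h - l + 1 ≤ 0 by omega)]
  | succ fuel ih =>
    intro l h hk res
    by_cases hlh : l ≤ h
    · have hb := PySem.Int.floordiv_two_mid_bounds hlh
      rw [binPositionsLoop, binPositionsGo]
      simp only [hlh, dif_pos, (show ¬ h - l + 1 ≤ 0 by omega), dif_neg, not_false_iff]
      have hmid := mid_shift l h hlh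
      have hdv : PySem.Int.floordiv (h - l) 2 = (h - l) / 2 :=
        PySem.Int.floordiv_eq_ediv_of_pos (by norm_num)
      have hs1 : h - l + 1 - 1 = h - l := by omega
      rw [hs1]
      set m := PySem.Int.floordiv (l + h) 2 with hm
      have hmk : m = l + (h - l) / 2 := by rw [hmid, hdv]
      rw [hdv, ← hmk]
      by_cases h1 : m = p
      · simp [h1]
      · by_cases h2 : m < p
        · simp only [h1, if_neg, h2, if_pos, not_false_iff]
          rw [ih (m + 1) h (by omega)]
          have hsz : h - (m + 1) + 1 = h - l + 1 - (h - l) / 2 - 1 := by omega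
          rw [hsz]
          simp
        · simp only [h1, if_neg, h2, if_neg, not_false_iff]
          rw [ih l (m - 1) (by omega)]
          have hsz : m - 1 - l + 1 = (h - l) / 2 := by omega
          rw [hsz]
          simp
    · rw [binPositionsLoop, binPositionsGo]
      simp [hlh, (show h - l + 1 ≤ 0 by omega)]

-- ===== VERDICT (by name: the statement is the Claim_ definition above) =====
theorem binPositions_spec : Claim_equal_binPositions := by
  intro p n _
  unfold Spec_binPositions binPositions binPositions_alt
  rw [binPositionsLoop_eq_go p ((n - 1) - 0 + 1).toNat 0 (n - 1) le_rfl]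
  simp
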